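-- pv_equiv track=rewrite | github.com/helsinki-sda-group/smas-rl-gnn | aggregate_ablation_results.py | _map_ts_to_available
-- ===== SOURCE A (Python) =====
-- from typing import Dict, Iterable, List, Optional, Tuple
--
-- def _map_ts_to_available(ts_ref: List[int], ts_available: List[int]) -> List[int]:
--     if not ts_ref or not ts_available:
--         return []
--     available_sorted = sorted(ts_available)
--     mapped = []
--     for t in ts_ref:
--         candidates = [x for x in available_sorted if x <= t]
--         if candidates:
--             mapped.append(candidates[-1])
--     return sorted(set(mapped))
-- ===== SOURCE B (Python) =====
-- from bisect import bisect_right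
-- from typing import List
--
--
-- def _map_ts_to_available(ts_ref: List[int], ts_available: List[int]) -> List[int]:
--     avail = sorted(ts_available)
--     chosen = set()
--     for t in ts_ref:
--         i = bisect_right(avail, t)
--         if i:
--             chosen.add(avail[i - 1])
--     return sorted(chosen)
-- ===== Notes on version B (the rewrite author's own statement) =====
-- stated objective: faster
-- what changed: Replaces A's per-timestamp linear filter of the sorted availability list (building the whole candidate list just to take its last element) by one bisect_right binary search per timestamp, and accumulates the chosen values directly in a set instead of a list deduplicated at the end.
import Mathlib
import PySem

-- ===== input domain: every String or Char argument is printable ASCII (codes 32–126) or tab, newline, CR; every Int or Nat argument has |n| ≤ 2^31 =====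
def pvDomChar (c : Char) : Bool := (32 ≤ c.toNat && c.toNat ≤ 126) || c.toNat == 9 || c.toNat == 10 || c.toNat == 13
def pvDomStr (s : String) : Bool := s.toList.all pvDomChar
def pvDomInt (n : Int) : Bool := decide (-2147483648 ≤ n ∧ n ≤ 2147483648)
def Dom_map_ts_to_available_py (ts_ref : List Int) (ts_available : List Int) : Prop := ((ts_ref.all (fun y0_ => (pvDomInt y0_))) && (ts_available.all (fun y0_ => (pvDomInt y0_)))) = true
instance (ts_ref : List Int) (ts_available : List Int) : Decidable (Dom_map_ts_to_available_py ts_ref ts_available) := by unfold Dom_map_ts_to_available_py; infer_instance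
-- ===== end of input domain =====

-- B replaces A's per-timestamp linear filter of the sorted availability list by one
-- bisect_right lookup per timestamp and collects the chosen values directly into a set
-- (objective: faster — per-element binary search instead of a per-element scan).

-- ===== PORT A =====
def map_ts_to_available_py (ts_ref : List Int) (ts_available : List Int) : List Int :=
  if ts_ref = [] ∨ ts_available = [] then []
  else
    let available_sorted := PySem.List.sorted ts_available (fun x => x) false
    let mapped := ts_ref.foldl (fun acc t =>
      let candidates := available_sorted.filter (fun x => decide (x ≤ t))
      if candidates ≠ [] then acc ++ [PySem.List.pyGetD candidates (-1) 0] else acc) []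
    PySem.List.sorted (PySem.Set.ofList mapped) (fun x => x) false

-- ===== PORT B =====
def map_ts_to_available_py_alt (ts_ref : List Int) (ts_available : List Int) : List Int :=
  let avail := PySem.List.sorted ts_available (fun x => x) false
  let chosen := ts_ref.foldl (fun (s : PySem.Set Int) t =>
    let i := PySem.List.bisectRight avail t
    if i ≠ 0 then PySem.Set.add s (avail.getD (i - 1) 0) else s) PySem.Set.empty
  PySem.List.sorted chosen (fun x => x) false

-- ===== PRECONDITION & SPEC =====
def Spec_map_ts_to_available_py (ts_ref : List Int) (ts_available : List Int) (out : List Int) : Prop := out = map_ts_to_available_py_alt ts_ref ts_available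
instance (ts_ref : List Int) (ts_available : List Int) (out : List Int) : Decidable (Spec_map_ts_to_available_py ts_ref ts_available out) := by unfold Spec_map_ts_to_available_py; infer_instance

-- ===== CLAIM (what is proved, stated in full; the proofs are below) =====
def Claim_equal_map_ts_to_available_py : Prop := ∀ (ts_ref : List Int) (ts_available : List Int), Dom_map_ts_to_available_py ts_ref ts_available → Spec_map_ts_to_available_py ts_ref ts_available (map_ts_to_available_py ts_ref ts_available)

-- ===== LEMMAS AND PROOFS =====

-- On a sorted list, the elements ≤ t are exactly the prefix of length bisectRight avail t.
lemma filter_le_eq_take (avail : List Int) (t : Int)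
    (h : avail.Pairwise (· ≤ ·)) :
    avail.filter (fun x => decide (x ≤ t)) = avail.take (PySem.List.bisectRight avail t) := by
  obtain ⟨hle, hlt, hgt⟩ := PySem.List.bisectRight_spec avail t h
  set i := PySem.List.bisectRight avail t with hi
  conv_lhs => rw [← List.take_append_drop i avail]
  rw [List.filter_append]
  have h1 : (avail.take i).filter (fun x => decide (x ≤ t)) = avail.take i := by
    apply List.filter_eq_self.2
    intro a ha
    obtain ⟨j, hj, rfl⟩ := List.mem_take_iff_getElem.mp ha
    simp only [decide_eq_true_eq]
    exact hlt j (by omega) (by omega)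
  have h2 : (avail.drop i).filter (fun x => decide (x ≤ t)) = [] := by
    apply List.filter_eq_nil_iff.2
    intro a ha
    rw [List.mem_iff_getElem] at ha
    obtain ⟨j, hj, rfl⟩ := ha
    rw [List.getElem_drop]
    simp only [decide_eq_true_eq, not_le]
    exact hgt (i + j) (by simp at hj; omega) (by omega)
  rw [h1, h2, List.append_nil]

-- One loop step of A and of B choose the same value (or both skip).
lemma step_eq (avail : List Int) (t : Int) (h : avail.Pairwise (· ≤ ·)) (acc : List Int) :
    (if avail.filter (fun x => decide (x ≤ t)) ≠ [] then
        acc ++ [PySem.List.pyGetD (avail.filter (fun x => decide (x ≤ t))) (-1) 0] else acc)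
    = (if PySem.List.bisectRight avail t ≠ 0 then
        acc ++ [avail.getD (PySem.List.bisectRight avail t - 1) 0] else acc) := by
  obtain ⟨hle, hlt, hgt⟩ := PySem.List.bisectRight_spec avail t h
  rw [filter_le_eq_take avail t h]
  set i := PySem.List.bisectRight avail t with hi
  have hlen : (avail.take i).length = i := by
    rw [List.length_take]; omega
  by_cases hz : i = 0
  · simp [hz]
  · have hne : avail.take i ≠ [] := by
      intro hcon; rw [← List.length_eq_zero_iff, hlen] at hcon; exact hz hcon
    rw [if_pos hne, if_pos hz]
    congr 2
    rw [PySem.List.pyGetD_neg_one _ _ hne, List.getLast_eq_getElem]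
    rw [List.getElem_take]
    rw [List.getD_eq_getElem _ _ (by omega)]
    congr 1
    omega

-- The two loops agree: B's set accumulator is set(A's list accumulator), pointwise in the loop.
lemma fold_eq (avail : List Int) (h : avail.Pairwise (· ≤ ·)) (ts : List Int) (l : List Int) :
    ts.foldl (fun (s : PySem.Set Int) t =>
      if PySem.List.bisectRight avail t ≠ 0 then
        PySem.Set.add s (avail.getD (PySem.List.bisectRight avail t - 1) 0) else s) (PySem.Set.ofList l)
    = PySem.Set.ofList (ts.foldl (fun acc t =>
      if avail.filter (fun x => decide (x ≤ t)) ≠ [] then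
        acc ++ [PySem.List.pyGetD (avail.filter (fun x => decide (x ≤ t))) (-1) 0] else acc) l) := by
  induction ts generalizing l with
  | nil => rfl
  | cons t ts ih =>
    simp only [List.foldl_cons]
    rw [step_eq avail t h l]
    by_cases hz : PySem.List.bisectRight avail t = 0
    · rw [if_neg (not_not_intro hz), if_neg (not_not_intro hz)]
      exact ih l
    · rw [if_pos hz, if_pos hz]
      have hset : PySem.Set.add (PySem.Set.ofList l) (avail.getD (PySem.List.bisectRight avail t - 1) 0)
          = PySem.Set.ofList (l ++ [avail.getD (PySem.List.bisectRight avail t - 1) 0]) := by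
        rw [PySem.Set.ofList_eq_foldl, PySem.Set.ofList_eq_foldl, List.foldl_append]
        rfl
      rw [hset]
      exact ih _

-- fold_eq started from the empty accumulators (Set.empty is ofList [] definitionally).
lemma fold_eq_empty (avail : List Int) (h : avail.Pairwise (· ≤ ·)) (ts : List Int) :
    ts.foldl (fun (s : PySem.Set Int) t =>
      if PySem.List.bisectRight avail t ≠ 0 then
        PySem.Set.add s (avail.getD (PySem.List.bisectRight avail t - 1) 0) else s) PySem.Set.empty
    = PySem.Set.ofList (ts.foldl (fun acc t =>
      if avail.filter (fun x => decide (x ≤ t)) ≠ [] then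
        acc ++ [PySem.List.pyGetD (avail.filter (fun x => decide (x ≤ t))) (-1) 0] else acc) []) :=
  fold_eq avail h ts []

-- A's loop over an empty availability list collects nothing.
lemma foldA_nil_avail (ts : List Int) :
    ts.foldl (fun acc t =>
      if ([] : List Int).filter (fun x => decide (x ≤ t)) ≠ [] then
        acc ++ [PySem.List.pyGetD (([] : List Int).filter (fun x => decide (x ≤ t))) (-1) 0]
      else acc) [] = [] := by
  induction ts with
  | nil => rfl
  | cons t ts ih =>
    simp only [List.foldl_cons, List.filter_nil, ne_eq, not_true_eq_false, if_false]
    exact ih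

-- ===== VERDICT (by name: the statement is the Claim_ definition above) =====
theorem map_ts_to_available_py_spec : Claim_equal_map_ts_to_available_py := by
  intro ts_ref ts_available _
  unfold Spec_map_ts_to_available_py
  simp only [map_ts_to_available_py, map_ts_to_available_py_alt]
  have hsorted : (PySem.List.sorted ts_available (fun x => x) false).Pairwise (· ≤ ·) :=
    PySem.List.sorted_pairwise ts_available (fun x => x)
  have hmain := fold_eq_empty (PySem.List.sorted ts_available (fun x => x) false) hsorted ts_ref
  by_cases hg : ts_ref = [] ∨ ts_available = []
  · rw [if_pos hg]
    rcases hg with hg | hg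
    · subst hg; rfl
    · subst hg
      rw [show PySem.List.sorted ([] : List Int) (fun x => x) false = [] from rfl] at hmain ⊢
      rw [hmain, foldA_nil_avail ts_ref]
      rfl
  · rw [if_neg hg]
    rw [hmain]
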